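-- pv_equiv track=rewrite | github.com/TRIP-Lab/itinerum-archiver | archiver/csv_formatters.py | survey_response_header
-- ===== SOURCE A (Python) =====
-- def survey_response_header(mobile_users_cols, questions_cols, timestamp_cols, location_cols, exclude_cols):
--     header = mobile_users_cols + questions_cols
--
--     # add location latitude/longitude as two separate columns
--     for col in location_cols:
--         lat_col = col + '_lat'
--         lon_col = col + '_lon'
--         header.append(lat_col)
--         header.append(lon_col)
--
--     # add timestamp columns as UTC timestamp and epoch time
--     for col in timestamp_cols:
--         col_idx = header.index(col)
--         header[col_idx] = col + '_UTC'
--         header.insert(col_idx + 1, col + '_epoch')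
--
--     header = [h.replace(' ', '_') for h in header]
--     return header
-- ===== SOURCE B (Python) =====
-- def survey_response_header(mobile_users_cols, questions_cols, timestamp_cols, location_cols, exclude_cols):
--     base = mobile_users_cols + questions_cols
--     for col in location_cols:
--         base.append(col + '_lat')
--         base.append(col + '_lon')
--     need = {}
--     for col in timestamp_cols:
--         need[col] = need.get(col, 0) + 1
--     header = []
--     for col in base:
--         if need.get(col, 0) > 0:
--             need[col] = need[col] - 1
--             header.append(col + '_UTC')
--             header.append(col + '_epoch')
--         else:
--             header.append(col)
--     return [h.replace(' ', '_') for h in header]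
-- ===== Notes on version B (the rewrite author's own statement) =====
-- stated objective: faster
-- what changed: B replaces A's per-timestamp-column .index search with in-place set/insert mutation by a multiplicity counter built once and a single forward pass over the base header that expands a column into its _UTC/_epoch pair while its counter budget lasts.
import Mathlib
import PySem

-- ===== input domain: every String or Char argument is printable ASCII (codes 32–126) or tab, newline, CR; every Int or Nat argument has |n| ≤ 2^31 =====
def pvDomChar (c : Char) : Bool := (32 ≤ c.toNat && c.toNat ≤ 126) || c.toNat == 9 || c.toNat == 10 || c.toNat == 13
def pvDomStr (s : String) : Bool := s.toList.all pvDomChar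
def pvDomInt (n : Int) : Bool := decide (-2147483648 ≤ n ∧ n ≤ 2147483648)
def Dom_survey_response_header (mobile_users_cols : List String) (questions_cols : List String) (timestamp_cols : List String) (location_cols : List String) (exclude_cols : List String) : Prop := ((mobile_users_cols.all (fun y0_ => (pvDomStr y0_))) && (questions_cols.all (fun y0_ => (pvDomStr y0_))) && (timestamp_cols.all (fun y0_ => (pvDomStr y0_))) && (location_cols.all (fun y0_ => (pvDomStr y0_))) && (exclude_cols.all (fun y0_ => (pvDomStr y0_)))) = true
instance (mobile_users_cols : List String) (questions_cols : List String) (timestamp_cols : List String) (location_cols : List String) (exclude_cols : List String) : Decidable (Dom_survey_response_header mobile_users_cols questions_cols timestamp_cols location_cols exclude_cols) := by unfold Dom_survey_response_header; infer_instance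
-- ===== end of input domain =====

-- B builds the header in one forward pass driven by a multiplicity counter of the timestamp
-- columns instead of A's per-column .index search with in-place set/insert mutation (objective: faster).

-- ===== PORT A =====
-- the 'for col in timestamp_cols' loop: header.index(col) raising ValueError is the none branch
def pvALoop (header : List String) (ts : List String) : Option (List String) :=
  match ts with
  | [] => some header
  | c :: rest =>
    match PySem.List.index? header c with
    | none => none   -- header.index(col) raises ValueError
    | some i =>
      pvALoop (PySem.List.insert (PySem.List.pySetD header (i : Int) (c ++ "_UTC")) ((i : Int) + 1) (c ++ "_epoch")) rest

def survey_response_header (mobile_users_cols : List String) (questions_cols : List String) (timestamp_cols : List String) (location_cols : List String) (exclude_cols : List String) : List String :=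
  match pvALoop (location_cols.foldl (fun h col => (h ++ [col ++ "_lat"]) ++ [col ++ "_lon"]) (mobile_users_cols ++ questions_cols)) timestamp_cols with
  | none => []   -- ValueError: excluded by Pre_
  | some h => h.map (fun s => PySem.Str.replace s " " "_")

-- ===== PORT B =====
def survey_response_header_alt (mobile_users_cols : List String) (questions_cols : List String) (timestamp_cols : List String) (location_cols : List String) (exclude_cols : List String) : List String :=
  (((location_cols.foldl (fun h col => (h ++ [col ++ "_lat"]) ++ [col ++ "_lon"]) (mobile_users_cols ++ questions_cols)).foldl
      (fun st col =>
        if 0 < PySem.Dict.getD st.1 col 0 then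
          (PySem.Dict.insert st.1 col (PySem.Dict.getD st.1 col 0 - 1), (st.2 ++ [col ++ "_UTC"]) ++ [col ++ "_epoch"])
        else (st.1, st.2 ++ [col]))
      (timestamp_cols.foldl (fun d col => PySem.Dict.insert d col (PySem.Dict.getD d col 0 + 1)) (PySem.Dict.empty : PySem.Dict String Int),
       ([] : List String))).2).map
    (fun s => PySem.Str.replace s " " "_")

-- ===== PRECONDITION & SPEC =====
-- Pre_ excludes inputs where some timestamp column occurs in the built base header fewer times
-- than it is listed (there A raises ValueError), and the accidental corner where a timestamp
-- column collides with another timestamp column's generated '_UTC'/'_epoch' name — there A's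
-- .index re-scan can find a freshly inserted column and its mutation order is accidental.
def Pre_survey_response_header (mobile_users_cols : List String) (questions_cols : List String) (timestamp_cols : List String) (location_cols : List String) (exclude_cols : List String) : Prop :=
  (∀ c ∈ timestamp_cols,
      timestamp_cols.count c ≤ ((mobile_users_cols ++ questions_cols) ++ location_cols.flatMap (fun l => [l ++ "_lat", l ++ "_lon"])).count c) ∧
  (∀ c ∈ timestamp_cols, ∀ c' ∈ timestamp_cols, c ≠ c' ++ "_UTC" ∧ c ≠ c' ++ "_epoch")
instance (mobile_users_cols : List String) (questions_cols : List String) (timestamp_cols : List String) (location_cols : List String) (exclude_cols : List String) : Decidable (Pre_survey_response_header mobile_users_cols questions_cols timestamp_cols location_cols exclude_cols) := by unfold Pre_survey_response_header; infer_instance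

def pvWitness_survey_response_header : List String × List String × List String × List String × List String :=
  (["uuid", "start time"], ["q1"], ["start time"], ["loc"], [])

def Spec_survey_response_header (mobile_users_cols : List String) (questions_cols : List String) (timestamp_cols : List String) (location_cols : List String) (exclude_cols : List String) (out : List String) : Prop := out = survey_response_header_alt mobile_users_cols questions_cols timestamp_cols location_cols exclude_cols
instance (mobile_users_cols : List String) (questions_cols : List String) (timestamp_cols : List String) (location_cols : List String) (exclude_cols : List String) (out : List String) : Decidable (Spec_survey_response_header mobile_users_cols questions_cols timestamp_cols location_cols exclude_cols out) := by unfold Spec_survey_response_header; infer_instance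

-- ===== CLAIM (what is proved, stated in full; the proofs are below) =====
def Claim_equal_survey_response_header : Prop := ∀ (mobile_users_cols : List String) (questions_cols : List String) (timestamp_cols : List String) (location_cols : List String) (exclude_cols : List String), Dom_survey_response_header mobile_users_cols questions_cols timestamp_cols location_cols exclude_cols → Pre_survey_response_header mobile_users_cols questions_cols timestamp_cols location_cols exclude_cols → Spec_survey_response_header mobile_users_cols questions_cols timestamp_cols location_cols exclude_cols (survey_response_header mobile_users_cols questions_cols timestamp_cols location_cols exclude_cols)

-- ===== LEMMAS AND PROOFS =====

-- abstract form of B's counting pass: f gives each column's remaining expansion budget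
def pvSpec : (String → Int) → List String → List String
  | _, [] => []
  | f, x :: xs =>
    if 0 < f x then (x ++ "_UTC") :: (x ++ "_epoch") :: pvSpec (fun y => if y = x then f x - 1 else f y) xs
    else x :: pvSpec f xs

lemma pvSpec_congr (f g : String → Int) (h : ∀ x, f x = g x) (l : List String) :
    pvSpec f l = pvSpec g l := by
  have : f = g := funext h
  rw [this]

lemma pvSpec_of_nonpos (f : String → Int) (l : List String) (h : ∀ x ∈ l, ¬ 0 < f x) :
    pvSpec f l = l := by
  induction l with
  | nil => rfl
  | cons x xs ih =>
    rw [pvSpec, if_neg (h x List.mem_cons_self)]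
    exact congrArg _ (ih (fun y hy => h y (List.mem_cons_of_mem _ hy)))

-- the base header both ports build by folding over location_cols, as a flatMap
lemma pvBase_foldl (mobile_users_cols questions_cols location_cols : List String) :
    location_cols.foldl (fun h col => (h ++ [col ++ "_lat"]) ++ [col ++ "_lon"]) (mobile_users_cols ++ questions_cols)
      = (mobile_users_cols ++ questions_cols) ++ location_cols.flatMap (fun l => [l ++ "_lat", l ++ "_lon"]) := by
  have h : ∀ (acc : List String),
      location_cols.foldl (fun h col => (h ++ [col ++ "_lat"]) ++ [col ++ "_lon"]) acc
        = acc ++ location_cols.flatMap (fun l => [l ++ "_lat", l ++ "_lon"]) := by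
    induction location_cols with
    | nil => intro acc; simp
    | cons c cs ih =>
      intro acc
      rw [List.foldl_cons, ih]
      simp [List.append_assoc]
  exact h _

-- B's counting pass over the base equals pvSpec of the dict's budgets
lemma pvBLoop_eq (base : List String) : ∀ (d : PySem.Dict String Int) (acc : List String),
    (base.foldl
        (fun st col =>
          if 0 < PySem.Dict.getD st.1 col 0 then
            (PySem.Dict.insert st.1 col (PySem.Dict.getD st.1 col 0 - 1), (st.2 ++ [col ++ "_UTC"]) ++ [col ++ "_epoch"])
          else (st.1, st.2 ++ [col]))
        (d, acc)).2
      = acc ++ pvSpec (fun c => PySem.Dict.getD d c 0) base := by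
  induction base with
  | nil => intro d acc; simp [pvSpec]
  | cons b bs ih =>
    intro d acc
    rw [List.foldl_cons, pvSpec]
    by_cases h : 0 < PySem.Dict.getD d b 0
    · rw [if_pos h, if_pos h]
      simp only
      rw [ih,
          pvSpec_congr (fun c => PySem.Dict.getD (PySem.Dict.insert d b (PySem.Dict.getD d b 0 - 1)) c 0)
            (fun y => if y = b then PySem.Dict.getD d b 0 - 1 else PySem.Dict.getD d y 0)
            (fun x => by simp [PySem.Dict.getD_insert])]
      simp [List.append_assoc]
    · rw [if_neg h, if_neg h]
      simp only
      rw [ih]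
      simp [List.append_assoc]

-- inserting the _UTC/_epoch pair at the first occurrence of c commutes with the counting pass
lemma pvSpec_shift (c : String) (suf : List String)
    (hne1 : c ++ "_UTC" ≠ c) (hne2 : c ++ "_epoch" ≠ c) :
    ∀ (pre : List String) (f g : String → Int),
    c ∉ pre →
    (∀ x, x ≠ c → f x = g x) →
    f c = g c + 1 →
    0 ≤ g c →
    f (c ++ "_UTC") ≤ 0 → f (c ++ "_epoch") ≤ 0 →
    pvSpec f (pre ++ c :: suf) = pvSpec g (pre ++ (c ++ "_UTC") :: (c ++ "_epoch") :: suf) := by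
  intro pre
  induction pre with
  | nil =>
    intro f g _ hfg hfc hgc hU hE
    simp only [List.nil_append]
    rw [show pvSpec f (c :: suf) = (c ++ "_UTC") :: (c ++ "_epoch") :: pvSpec (fun y => if y = c then f c - 1 else f y) suf from by
          rw [pvSpec, if_pos (by omega)],
        show pvSpec g ((c ++ "_UTC") :: (c ++ "_epoch") :: suf) = (c ++ "_UTC") :: pvSpec g ((c ++ "_epoch") :: suf) from by
          rw [pvSpec, if_neg (by rw [← hfg _ hne1]; omega)],
        show pvSpec g ((c ++ "_epoch") :: suf) = (c ++ "_epoch") :: pvSpec g suf from by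
          rw [pvSpec, if_neg (by rw [← hfg _ hne2]; omega)]]
    refine congrArg _ (congrArg _ ?_)
    exact pvSpec_congr _ _ (fun y => by
      by_cases hy : y = c
      · subst hy; simp; omega
      · simp [hy, hfg y hy]) suf
  | cons p ps ih =>
    intro f g hcp hfg hfc hgc hU hE
    have hpc : p ≠ c := fun h => hcp (h ▸ List.mem_cons_self)
    have hcps : c ∉ ps := fun h => hcp (List.mem_cons_of_mem _ h)
    simp only [List.cons_append]
    rw [pvSpec, pvSpec]
    by_cases h : 0 < f p
    · rw [if_pos h, if_pos (by rw [← hfg p hpc]; exact h)]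
      refine congrArg _ (congrArg _ ?_)
      refine ih _ _ hcps ?_ ?_ ?_ ?_ ?_
      · intro x hx
        by_cases hxp : x = p
        · subst hxp; simp [hfg x hx]
        · simp [hxp, hfg x hx]
      · simp [Ne.symm hpc, hfc]
      · simpa [Ne.symm hpc] using hgc
      · by_cases hup : c ++ "_UTC" = p
        · rw [hup] at hU; simp [hup]; omega
        · simpa [hup] using hU
      · by_cases hep : c ++ "_epoch" = p
        · rw [hep] at hE; simp [hep]; omega
        · simpa [hep] using hE
    · rw [if_neg h, if_neg (by rw [← hfg p hpc]; exact h)]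
      exact congrArg _ (ih f g hcps hfg hfc hgc hU hE)

-- A's mutation loop computes exactly the counting pass with budgets = multiplicities in ts
lemma pvALoop_spec (ts : List String) : ∀ (header : List String),
    (∀ c ∈ ts, ts.count c ≤ header.count c) →
    (∀ c ∈ ts, ∀ c' ∈ ts, c ≠ c' ++ "_UTC" ∧ c ≠ c' ++ "_epoch") →
    pvALoop header ts = some (pvSpec (fun c => (ts.count c : Int)) header) := by
  induction ts with
  | nil =>
    intro header _ _
    rw [pvALoop, pvSpec_of_nonpos _ _ (fun x _ => by simp)]
  | cons c rest ih =>
    intro header hcount hcol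
    have hcmem : c ∈ header := by
      have h1 := hcount c List.mem_cons_self
      have h2 : 0 < List.count c (c :: rest) := List.count_pos_iff.mpr List.mem_cons_self
      exact List.count_pos_iff.mp (by omega)
    obtain ⟨i, hi⟩ := (PySem.List.index?_isSome_iff header c).mpr hcmem |> Option.isSome_iff_exists.mp
    obtain ⟨pre, suf, hsplit, hlen, hpre⟩ := (PySem.List.index?_eq_some_iff header c i).mp hi
    have hset : PySem.List.pySetD header (i : Int) (c ++ "_UTC") = pre ++ (c ++ "_UTC") :: suf := by
      rw [PySem.List.pySetD_natCast, hsplit, ← hlen]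
      simp
    have hins : PySem.List.insert (pre ++ (c ++ "_UTC") :: suf) ((i : Int) + 1) (c ++ "_epoch")
        = pre ++ (c ++ "_UTC") :: (c ++ "_epoch") :: suf := by
      have hcast : ((i : Int) + 1) = ((i + 1 : Nat) : Int) := by push_cast; ring
      have hassoc : pre ++ (c ++ "_UTC") :: suf = (pre ++ [c ++ "_UTC"]) ++ suf := by simp
      have hlen1 : i + 1 = (pre ++ [c ++ "_UTC"]).length := by simp [← hlen]
      rw [hcast, hassoc, hlen1, PySem.List.insert_natCast _ _ _ (by simp),
          List.take_left, List.drop_left]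
      simp
    have hneU : c ≠ c ++ "_UTC" := (hcol c List.mem_cons_self c List.mem_cons_self).1
    have hneE : c ≠ c ++ "_epoch" := (hcol c List.mem_cons_self c List.mem_cons_self).2
    have hUnot : (c ++ "_UTC") ∉ (c :: rest) := fun h =>
      (hcol _ h c List.mem_cons_self).1 rfl
    have hEnot : (c ++ "_epoch") ∉ (c :: rest) := fun h =>
      (hcol _ h c List.mem_cons_self).2 rfl
    have hcol' : ∀ a ∈ rest, ∀ b ∈ rest, a ≠ b ++ "_UTC" ∧ a ≠ b ++ "_epoch" :=
      fun a ha b hb => hcol a (List.mem_cons_of_mem _ ha) b (List.mem_cons_of_mem _ hb)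
    have hcount' : ∀ c' ∈ rest, rest.count c' ≤ (pre ++ (c ++ "_UTC") :: (c ++ "_epoch") :: suf).count c' := by
      intro c' hc'
      have h1 := hcount c' (List.mem_cons_of_mem _ hc')
      have hU : c' ≠ c ++ "_UTC" := (hcol c' (List.mem_cons_of_mem _ hc') c List.mem_cons_self).1
      have hE : c' ≠ c ++ "_epoch" := (hcol c' (List.mem_cons_of_mem _ hc') c List.mem_cons_self).2
      rw [hsplit] at h1
      by_cases hcc : c' = c
      · subst hcc
        simp [List.count_append, List.count_cons, Ne.symm hU, Ne.symm hE, hpre] at h1 ⊢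
        simp [List.count_eq_zero.mpr hpre] at h1 ⊢
        omega
      · simp [List.count_append, List.count_cons, Ne.symm hU, Ne.symm hE, Ne.symm hcc, hcc] at h1 ⊢
        omega
    have hstep : pvALoop header (c :: rest)
        = pvALoop (pre ++ (c ++ "_UTC") :: (c ++ "_epoch") :: suf) rest := by
      simp only [pvALoop, hi, hset, hins]
    rw [hstep, ih _ hcount' hcol']
    refine congrArg _ ?_
    rw [hsplit]
    exact (pvSpec_shift c suf (Ne.symm hneU) (Ne.symm hneE) pre _ _ hpre
      (fun x hx => by simp [List.count_cons, Ne.symm hx])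
      (by push_cast [List.count_cons_self]; ring)
      (by positivity)
      (by simp [List.count_eq_zero.mpr hUnot])
      (by simp [List.count_eq_zero.mpr hEnot])).symm

-- ===== VERDICT (by name: the statement is the Claim_ definition above) =====
theorem survey_response_header_spec : Claim_equal_survey_response_header := by
  intro m q t l e _ hpre
  obtain ⟨hcount, hcol⟩ := hpre
  unfold Spec_survey_response_header survey_response_header survey_response_header_alt
  rw [pvBase_foldl]
  rw [pvBLoop_eq]
  rw [
      pvALoop_spec t _ hcount hcol,
      pvSpec_congr (fun c => PySem.Dict.getD (t.foldl (fun d col => PySem.Dict.insert d col (PySem.Dict.getD d col 0 + 1)) PySem.Dict.empty) c 0)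
        (fun c => (t.count c : Int))
        (fun x => by
          show PySem.Dict.getD (t.foldl (fun d col => PySem.Dict.insert d col (PySem.Dict.getD d col 0 + 1)) (PySem.Dict.empty : PySem.Dict String Int)) x 0 = ((t.count x : Nat) : Int)
          rw [PySem.Dict.getD_foldl_insert_add_one]
          simp [PySem.Dict.getD, PySem.Dict.get?, PySem.Dict.empty])]
  simp
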